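-- pv_equiv track=rewrite | github.com/rergards/mempalace-code | benchmarks/dotnet_bench.py | hit_at_k
-- ===== SOURCE A (Python) =====
-- def hit_at_k(results_metadatas, expected_files, k):
--     """Check if any expected file appears in top-k results (basename equality)."""
--     top_k = results_metadatas[:k]
--     for meta in top_k:
--         source = meta.get("source_file", "")
--         source_basename = source.rsplit("/", 1)[-1]
--         for expected in expected_files:
--             if source_basename == expected:
--                 return True
--     return False
-- ===== SOURCE B (Python) =====
-- def hit_at_k(results_metadatas, expected_files, k):
--     """Check if any expected file appears in top-k results (basename equality).
--
--     Sort-then-merge: sort the top-k basenames and the expected files, then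
--     sweep both sorted lists with two pointers to test whether they intersect."""
--     xs = sorted(meta.get("source_file", "").rsplit("/", 1)[-1]
--                 for meta in results_metadatas[:k])
--     ys = sorted(expected_files)
--     i = j = 0
--     while i < len(xs) and j < len(ys):
--         if xs[i] == ys[j]:
--             return True
--         if xs[i] < ys[j]:
--             i += 1
--         else:
--             j += 1
--     return False
-- ===== Notes on version B (the rewrite author's own statement) =====
-- stated objective: faster
-- what changed: B replaces A's nested scan (each top-k basename compared against every expected file) with a sort-then-merge intersection test: sort the top-k basenames and the expected files, then sweep both sorted lists with two pointers, returning True exactly when they share an element.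
import Mathlib
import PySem

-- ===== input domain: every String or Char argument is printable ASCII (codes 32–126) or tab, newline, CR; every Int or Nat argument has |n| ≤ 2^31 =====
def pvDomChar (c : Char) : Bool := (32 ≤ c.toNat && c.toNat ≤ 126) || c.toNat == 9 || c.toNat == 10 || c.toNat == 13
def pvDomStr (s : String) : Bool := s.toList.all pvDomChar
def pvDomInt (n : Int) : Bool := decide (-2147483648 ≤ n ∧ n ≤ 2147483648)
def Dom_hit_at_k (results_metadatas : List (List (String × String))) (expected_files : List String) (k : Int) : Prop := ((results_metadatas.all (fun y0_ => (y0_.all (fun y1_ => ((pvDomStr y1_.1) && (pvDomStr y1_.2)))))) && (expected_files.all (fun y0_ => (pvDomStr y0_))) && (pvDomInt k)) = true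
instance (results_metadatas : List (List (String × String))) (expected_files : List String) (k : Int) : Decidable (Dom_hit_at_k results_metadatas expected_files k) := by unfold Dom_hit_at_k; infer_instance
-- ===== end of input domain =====

-- B replaces A's nested scan by sort-then-merge: sort the top-k basenames and
-- the expected files, then sweep both sorted lists with two pointers; objective: alternative (same behaviour, return value proved equal).

-- shared helpers of both sources:
-- meta.get("source_file", "") on an association list: first matching key, else default (exact).
def pvDictGetD (m : List (String × String)) (key dflt : String) : String :=
  ((m.find? (fun p => p.1 == key)).map Prod.snd).getD dflt

-- hand port of s.rsplit("/", 1)[-1]: the suffix of s after the last '/' (all of s if no '/'); exact.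
def pvBasename (s : String) : String :=
  String.ofList ((s.toList.reverse.takeWhile (fun c => c ≠ '/')).reverse)

-- ===== PORT A =====
def pvHitLoopA (top_k : List (List (String × String))) (expected_files : List String) : Bool :=
  match top_k with
  | [] => false
  | md :: rest =>
      let source := pvDictGetD md "source_file" ""
      let source_basename := pvBasename source
      if expected_files.any (fun expected => source_basename == expected) then true
      else pvHitLoopA rest expected_files

def hit_at_k (results_metadatas : List (List (String × String))) (expected_files : List String) (k : Int) : Bool :=
  pvHitLoopA (PySem.List.slice results_metadatas none (some k)) expected_files

-- ===== PORT B =====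
-- the two-pointer while loop of Source B, transcribed on the remaining suffixes xs[i:], ys[j:]
def pvMergeHit (xs ys : List String) : Bool :=
  match xs, ys with
  | [], _ => false
  | _ :: _, [] => false
  | a :: as_, b :: bs =>
      if a == b then true
      else if a < b then pvMergeHit as_ (b :: bs)
      else pvMergeHit (a :: as_) bs
termination_by xs.length + ys.length
decreasing_by all_goals simp only [List.length_cons]; omega

def hit_at_k_alt (results_metadatas : List (List (String × String))) (expected_files : List String) (k : Int) : Bool :=
  let xs := PySem.List.sorted ((PySem.List.slice results_metadatas none (some k)).map
      (fun md => pvBasename (pvDictGetD md "source_file" ""))) (fun x => x) false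
  let ys := PySem.List.sorted expected_files (fun x => x) false
  pvMergeHit xs ys

-- ===== PRECONDITION & SPEC =====
def Spec_hit_at_k (results_metadatas : List (List (String × String))) (expected_files : List String) (k : Int) (out : Bool) : Prop := out = hit_at_k_alt results_metadatas expected_files k
instance (results_metadatas : List (List (String × String))) (expected_files : List String) (k : Int) (out : Bool) : Decidable (Spec_hit_at_k results_metadatas expected_files k out) := by unfold Spec_hit_at_k; infer_instance

-- ===== CLAIM =====
def Claim_equal_hit_at_k : Prop := ∀ (results_metadatas : List (List (String × String))) (expected_files : List String) (k : Int), Dom_hit_at_k results_metadatas expected_files k → Spec_hit_at_k results_metadatas expected_files k (hit_at_k results_metadatas expected_files k)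

-- ===== LEMMAS AND PROOFS =====
theorem pvHitLoopA_eq_true_iff (L : List (List (String × String))) (ef : List String) :
    pvHitLoopA L ef = true ↔
      ∃ m ∈ L, ∃ e ∈ ef, pvBasename (pvDictGetD m "source_file" "") = e := by
  induction L with
  | nil => simp [pvHitLoopA]
  | cons md rest ih =>
      simp only [pvHitLoopA, List.any_eq_true, beq_iff_eq, List.mem_cons]
      split_ifs with h
      · simp only [true_iff]
        obtain ⟨e, he, hh⟩ := h
        exact ⟨md, Or.inl rfl, e, he, hh⟩
      · rw [ih]
        constructor
        · rintro ⟨m, hm, hrest⟩; exact ⟨m, Or.inr hm, hrest⟩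
        · rintro ⟨m, rfl | hm, hrest⟩
          · exact absurd hrest h
          · exact ⟨m, hm, hrest⟩

-- correctness of the two-pointer sweep: on sorted lists it decides intersection
theorem pvMergeHit_iff (xs ys : List String)
    (hx : xs.Pairwise (· ≤ ·)) (hy : ys.Pairwise (· ≤ ·)) :
    pvMergeHit xs ys = true ↔ ∃ x, x ∈ xs ∧ x ∈ ys := by
  fun_induction pvMergeHit xs ys with
  | case1 ys => simp
  | case2 a as_ => simp
  | case3 a as_ b bs heq =>
      simp only [beq_iff_eq] at heq
      subst heq
      simp only [true_iff]
      exact ⟨a, List.mem_cons_self, List.mem_cons_self⟩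
  | case4 a as_ b bs heq hlt ih =>
      simp only [beq_iff_eq] at heq
      rw [ih (List.Pairwise.of_cons hx) hy]
      constructor
      · rintro ⟨x, hx1, hx2⟩; exact ⟨x, List.mem_cons_of_mem a hx1, hx2⟩
      · rintro ⟨x, hx1, hx2⟩
        rcases List.mem_cons.1 hx1 with rfl | hx1'
        · rcases List.mem_cons.1 hx2 with rfl | hx2'
          · exact absurd rfl heq
          · have := (List.pairwise_cons.1 hy).1 x hx2'
            exact absurd (lt_of_lt_of_le hlt this) (lt_irrefl x)
        · exact ⟨x, hx1', hx2⟩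
  | case5 a as_ b bs heq hlt ih =>
      simp only [beq_iff_eq] at heq
      rw [ih hx (List.Pairwise.of_cons hy)]
      have hba : b < a := lt_of_le_of_ne (not_lt.1 hlt) (fun h => heq h.symm)
      constructor
      · rintro ⟨x, hx1, hx2⟩; exact ⟨x, hx1, List.mem_cons_of_mem b hx2⟩
      · rintro ⟨x, hx1, hx2⟩
        rcases List.mem_cons.1 hx2 with rfl | hx2'
        · rcases List.mem_cons.1 hx1 with rfl | hx1'
          · exact absurd rfl heq
          · have := (List.pairwise_cons.1 hx).1 x hx1'
            exact absurd (lt_of_lt_of_le hba this) (lt_irrefl x)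
        · exact ⟨x, hx1, hx2'⟩

theorem hit_at_k_eq (rm : List (List (String × String))) (ef : List String) (k : Int) :
    hit_at_k rm ef k = hit_at_k_alt rm ef k := by
  unfold hit_at_k hit_at_k_alt
  have hx := PySem.List.sorted_pairwise
    ((PySem.List.slice rm none (some k)).map (fun md => pvBasename (pvDictGetD md "source_file" "")))
    (fun x => x)
  have hy := PySem.List.sorted_pairwise ef (fun x => x)
  rw [Bool.eq_iff_iff, pvHitLoopA_eq_true_iff, pvMergeHit_iff _ _ hx hy]
  constructor
  · rintro ⟨m, hm, e, he, hme⟩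
    refine ⟨e, ?_, ?_⟩
    · rw [PySem.List.mem_sorted, List.mem_map]; exact ⟨m, hm, hme⟩
    · rw [PySem.List.mem_sorted]; exact he
  · rintro ⟨x, hx1, hx2⟩
    rw [PySem.List.mem_sorted, List.mem_map] at hx1
    rw [PySem.List.mem_sorted] at hx2
    obtain ⟨m, hm, hmx⟩ := hx1
    exact ⟨m, hm, x, hx2, hmx⟩

-- ===== VERDICT =====
theorem hit_at_k_spec : Claim_equal_hit_at_k := by
  intro rm ef k _
  unfold Spec_hit_at_k
  exact hit_at_k_eq rm ef k
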